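-- pv_equiv track=rewrite | github.com/Ramesh6421/DSA | Greedy Algorithms/FreeCodeCamp/7.Seats.py | solve
-- ===== SOURCE A (Python) =====
-- def solve(A):
--     mod=10000003
--     crosses = [i for i,c in enumerate(A) if c=="x"]   # taking 'x' indexes
--     crosses = [(cross-i) for i,cross in enumerate(crosses)]    # moves req assuming starting postion is 0
--     n=len(crosses)
--     if n==0:
--         return 0
--     ans=float('inf')
--     for segment_start in range(len(A)):  # checking at every index
--         cur=0
--         for cross in crosses:
--             cur+=abs(cross-segment_start)
--             cur=cur%mod
--         ans=min(ans,cur%mod)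
--     return ans
-- ===== SOURCE B (Python) =====
-- def solve(A):
--     mod = 10000003
--     crosses = []
--     for i, c in enumerate(A):
--         if c == "x":
--             crosses.append(i - len(crosses))
--     n = len(crosses)
--     if n == 0:
--         return 0
--     pre = [0]
--     for c in crosses:
--         pre.append(pre[-1] + c)
--     total = pre[n]
--     k = 0
--     best = None
--     for s in range(len(A)):
--         # crosses is nondecreasing; advance k to the count of crosses <= s
--         while k < n and crosses[k] <= s:
--             k += 1
--         cur = (s * k - pre[k] + (total - pre[k]) - s * (n - k)) % mod
--         if best is None or cur < best:
--             best = cur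
--     return best
-- ===== Notes on version B (the rewrite author's own statement) =====
-- stated objective: faster
-- what changed: Replaces A's rescan of all crosses for every start (O(len(A)*n)) with prefix sums over the sorted cross offsets plus a two-pointer count of crosses <= start, so each start's modded distance sum is evaluated in O(1).
import Mathlib
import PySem

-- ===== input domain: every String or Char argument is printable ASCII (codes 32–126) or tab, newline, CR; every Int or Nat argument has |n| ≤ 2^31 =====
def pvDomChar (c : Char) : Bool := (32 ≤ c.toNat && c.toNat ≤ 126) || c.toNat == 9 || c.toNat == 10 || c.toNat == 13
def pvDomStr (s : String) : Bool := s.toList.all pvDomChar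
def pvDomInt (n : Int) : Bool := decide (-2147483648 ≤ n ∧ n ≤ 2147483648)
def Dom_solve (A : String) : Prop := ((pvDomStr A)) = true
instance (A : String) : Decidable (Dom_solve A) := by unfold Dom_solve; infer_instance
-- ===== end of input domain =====

-- B replaces A's per-start rescan of all crosses by prefix sums + a two-pointer count of crosses ≤ start (objective: faster).

-- ===== PORT A =====
-- one iteration of A's outer loop: the inner mod-accumulating scan over all crosses, then min (None plays float('inf'))
def solveStep (crosses : List Int) (ans : Option Int) (s : Int) : Option Int :=
  let cur := crosses.foldl (fun c cross => PySem.Int.mod (c + |cross - s|) 10000003) 0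
  match ans with
  | none => some (PySem.Int.mod cur 10000003)
  | some a => some (min a (PySem.Int.mod cur 10000003))

def solve (A : String) : Int :=
  let xs := ((PySem.List.enumerate A.toList).filter (fun p => decide (p.2 = 'x'))).map (fun p => p.1)
  let crosses := (PySem.List.enumerate xs).map (fun p => p.2 - p.1)
  if crosses.length = 0 then 0
  else
    -- ans starts as float('inf') = none; with crosses nonempty the range is nonempty, so the fold yields some; getD 0 is unreachable
    ((PySem.List.pyRange 0 (PySem.Str.len A) 1).foldl (solveStep crosses) none).getD 0

-- ===== PORT B =====
-- the 'while k < n and crosses[k] <= s: k += 1' loop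
def advanceK (cs : List Int) (s : Int) (k : Nat) : Nat :=
  if h : k < cs.length then
    if cs[k] ≤ s then advanceK cs s (k + 1) else k
  else k
termination_by cs.length - k

-- one iteration of B's loop over starts: advance the pointer, O(1) formula from prefix sums, running min
def altStep (crosses pre : List Int) (total : Int) (n : Nat) (st : Nat × Option Int) (s : Int) : Nat × Option Int :=
  let k := advanceK crosses s st.1
  let cur := PySem.Int.mod (s * (k : Int) - pre.getD k 0 + (total - pre.getD k 0) - s * ((n - k : Nat) : Int)) 10000003
  match st.2 with
  | none => (k, some cur)
  | some b => (k, some (if cur < b then cur else b))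

def solve_alt (A : String) : Int :=
  let crosses := (PySem.List.enumerate A.toList).foldl
      (fun (acc : List Int) p => if p.2 = 'x' then acc ++ [p.1 - (acc.length : Int)] else acc) []
  let n := crosses.length
  if n = 0 then 0
  else
    let pre := crosses.scanl (· + ·) 0
    let total := pre.getD n 0
    -- best is None only if the range is empty, impossible here; getD 0 is unreachable
    ((PySem.List.pyRange 0 (PySem.Str.len A) 1).foldl (altStep crosses pre total n) (0, none)).2.getD 0

-- ===== PRECONDITION & SPEC =====
def Spec_solve (A : String) (out : Int) : Prop := out = solve_alt A
instance (A : String) (out : Int) : Decidable (Spec_solve A out) := by unfold Spec_solve; infer_instance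

-- ===== CLAIM (what is proved, stated in full; the proofs are below) =====
def Claim_equal_solve : Prop := ∀ (A : String), Dom_solve A → Spec_solve A (solve A)

-- ===== LEMMAS AND PROOFS =====

-- canonical cross-offset list: position i, j crosses already seen
def crAux : List Char → Int → Int → List Int
  | [], _, _ => []
  | c :: t, i, j => if c = 'x' then (i - j) :: crAux t (i + 1) (j + 1) else crAux t (i + 1) j

-- number of crosses ≤ s (the value B's pointer k tracks): length of the longest ≤-s prefix
def Lk : List Int → Int → Nat
  | [], _ => 0
  | x :: t, s => if x ≤ s then Lk t s + 1 else 0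

lemma crB_eq (l : List Char) : ∀ (i : Int) (acc : List Int),
    (PySem.List.enumerate l i).foldl
      (fun (acc : List Int) p => if p.2 = 'x' then acc ++ [p.1 - (acc.length : Int)] else acc) acc
    = acc ++ crAux l i (acc.length : Int) := by
  induction l with
  | nil => intro i acc; simp [PySem.List.enumerate_nil, crAux]
  | cons c t ih =>
    intro i acc
    rw [PySem.List.enumerate_cons, List.foldl_cons]
    by_cases hc : c = 'x'
    · simp only [crAux, if_pos hc]
      rw [ih]
      rw [List.append_assoc]
      simp
    · simp only [crAux, if_neg hc]
      rw [ih]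

lemma crA_eq (l : List Char) : ∀ (i j : Int),
    (PySem.List.enumerate (((PySem.List.enumerate l i).filter (fun p => decide (p.2 = 'x'))).map (fun p => p.1)) j).map
      (fun p => p.2 - p.1) = crAux l i j := by
  induction l with
  | nil => intro i j; simp [PySem.List.enumerate_nil, crAux]
  | cons c t ih =>
    intro i j
    rw [PySem.List.enumerate_cons]
    by_cases hc : c = 'x'
    · rw [List.filter_cons_of_pos (by simpa using hc)]
      simp only [crAux, if_pos hc]
      rw [List.map_cons, PySem.List.enumerate_cons, List.map_cons, ih]
    · rw [List.filter_cons_of_neg (by simpa using hc)]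
      simp only [crAux, if_neg hc]
      rw [ih]

lemma crAux_lb (l : List Char) : ∀ (i j x : Int), x ∈ crAux l i j → i - j ≤ x := by
  induction l with
  | nil => intro i j x hx; simp [crAux] at hx
  | cons c t ih =>
    intro i j x hx
    by_cases hc : c = 'x'
    · simp only [crAux, if_pos hc, List.mem_cons] at hx
      rcases hx with h | h
      · omega
      · have := ih (i + 1) (j + 1) x h; omega
    · simp only [crAux, if_neg hc] at hx
      have := ih (i + 1) j x hx; omega

lemma crAux_sorted (l : List Char) : ∀ (i j : Int), (crAux l i j).Pairwise (· ≤ ·) := by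
  induction l with
  | nil => intro i j; simp [crAux]
  | cons c t ih =>
    intro i j
    by_cases hc : c = 'x'
    · simp only [crAux, if_pos hc]
      refine List.pairwise_cons.mpr ⟨?_, ih _ _⟩
      intro x hx
      have := crAux_lb t (i + 1) (j + 1) x hx; omega
    · simp only [crAux, if_neg hc]
      exact ih _ _

lemma scanl_getD (cs : List Int) : ∀ (a : Int) (k : Nat), k ≤ cs.length →
    (cs.scanl (· + ·) a).getD k 0 = a + (cs.take k).sum := by
  induction cs with
  | nil =>
    intro a k hk
    have hk0 : k = 0 := by simpa using hk
    subst hk0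
    simp
  | cons x t ih =>
    intro a k hk
    rw [List.scanl_cons]
    cases k with
    | zero => simp
    | succ k =>
      rw [List.getD_cons_succ, List.take_succ_cons, List.sum_cons, ih (a + x) k (by simpa using hk)]
      ring

lemma Lk_le (cs : List Int) (s : Int) : Lk cs s ≤ cs.length := by
  induction cs with
  | nil => simp [Lk]
  | cons x t ih =>
    by_cases hx : x ≤ s
    · simp only [Lk, if_pos hx, List.length_cons]; omega
    · simp only [Lk, if_neg hx]; omega

lemma Lk_mono (cs : List Int) (s s' : Int) (hss : s ≤ s') : Lk cs s ≤ Lk cs s' := by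
  induction cs with
  | nil => simp [Lk]
  | cons x t ih =>
    by_cases hx : x ≤ s
    · simp only [Lk, if_pos hx, if_pos (le_trans hx hss)]; omega
    · simp only [Lk, if_neg hx]; omega

lemma Lk_getElem_le (cs : List Int) (s : Int) : ∀ (k : Nat), k < Lk cs s →
    ∀ (hk' : k < cs.length), cs[k] ≤ s := by
  induction cs with
  | nil => intro k hk hk'; simp at hk'
  | cons x t ih =>
    intro k hk hk'
    by_cases hx : x ≤ s
    · cases k with
      | zero => simpa using hx
      | succ k =>
        simp only [List.getElem_cons_succ]
        simp only [Lk, if_pos hx] at hk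
        exact ih k (by omega) (by simpa using hk')
    · simp [Lk, if_neg hx] at hk

lemma Lk_stop_gt (cs : List Int) (s : Int) : ∀ (k : Nat), k = Lk cs s →
    ∀ (hk' : k < cs.length), s < cs[k] := by
  induction cs with
  | nil => intro k hk hk'; simp at hk'
  | cons x t ih =>
    intro k hk hk'
    by_cases hx : x ≤ s
    · simp only [Lk, if_pos hx] at hk
      cases k with
      | zero => omega
      | succ k =>
        simp only [List.getElem_cons_succ]
        exact ih k (by omega) (by simpa using hk')
    · simp only [Lk, if_neg hx] at hk
      subst hk
      simpa using lt_of_not_ge hx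

lemma advanceK_eq (cs : List Int) (s : Int) :
    ∀ (d k : Nat), cs.length - k ≤ d → k ≤ Lk cs s → advanceK cs s k = Lk cs s := by
  intro d
  induction d with
  | zero =>
    intro k hd hk
    have h1 : Lk cs s ≤ cs.length := Lk_le cs s
    have hke : k = Lk cs s := by omega
    rw [advanceK, dif_neg (by omega)]
    exact hke
  | succ d ih =>
    intro k hd hk
    by_cases hlt : k < cs.length
    · rcases Nat.lt_or_ge k (Lk cs s) with hkL | hkL
      · rw [advanceK, dif_pos hlt, if_pos (Lk_getElem_le cs s k hkL hlt)]
        exact ih (k + 1) (by omega) hkL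
      · have hke : k = Lk cs s := by omega
        rw [advanceK, dif_pos hlt, if_neg (not_le.mpr (Lk_stop_gt cs s k hke hlt))]
        exact hke
    · have h1 : Lk cs s ≤ cs.length := Lk_le cs s
      rw [advanceK, dif_neg hlt]
      omega

lemma sum_abs_all_gt (cs : List Int) (s : Int) : (∀ y ∈ cs, s < y) →
    (cs.map (fun x => |x - s|)).sum = cs.sum - s * (cs.length : Int) := by
  induction cs with
  | nil => intro _; simp
  | cons x t ih =>
    intro h
    have hx : s < x := h x (List.mem_cons_self)
    have ht := ih (fun y hy => h y (List.mem_cons_of_mem x hy))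
    simp only [List.map_cons, List.sum_cons, List.length_cons, ht, abs_of_pos (by omega : (0:Int) < x - s)]
    push_cast
    ring

lemma sum_abs (cs : List Int) (s : Int) (hs : cs.Pairwise (· ≤ ·)) :
    (cs.map (fun x => |x - s|)).sum
      = s * (Lk cs s : Int) - (cs.take (Lk cs s)).sum
        + (cs.sum - (cs.take (Lk cs s)).sum)
        - s * ((cs.length - Lk cs s : Nat) : Int) := by
  induction cs with
  | nil => simp [Lk]
  | cons x t ih =>
    rcases List.pairwise_cons.mp hs with ⟨hxall, ht⟩
    by_cases hx : x ≤ s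
    · have hL : Lk (x :: t) s = Lk t s + 1 := by simp [Lk, if_pos hx]
      have hLt : Lk t s ≤ t.length := Lk_le t s
      rw [hL]
      simp only [List.map_cons, List.sum_cons, List.take_succ_cons, List.length_cons,
        ih ht, abs_of_nonpos (by omega : x - s ≤ 0)]
      have hcast : ((t.length + 1 - (Lk t s + 1) : Nat) : Int) = ((t.length - Lk t s : Nat) : Int) := by
        omega
      rw [hcast]
      push_cast [Nat.cast_sub hLt]
      ring
    · have hL : Lk (x :: t) s = 0 := by simp [Lk, if_neg hx]
      rw [hL]
      have hall : ∀ y ∈ x :: t, s < y := by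
        intro y hy
        rcases List.mem_cons.mp hy with rfl | hy
        · omega
        · have := hxall y hy; omega
      rw [sum_abs_all_gt (x :: t) s hall]
      simp

-- the inner mod-accumulating fold of A computes the total distance sum mod 10000003
lemma foldl_mod (s : Int) (cs : List Int) : ∀ (a : Int),
    PySem.Int.mod (cs.foldl (fun c cross => PySem.Int.mod (c + |cross - s|) 10000003) a) 10000003
      = PySem.Int.mod (a + (cs.map (fun x => |x - s|)).sum) 10000003 := by
  induction cs with
  | nil => intro a; simp
  | cons x t ih =>
    intro a
    rw [List.foldl_cons, ih]
    rw [PySem.Int.mod_eq_emod_of_pos (by norm_num), PySem.Int.mod_eq_emod_of_pos (by norm_num),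
      PySem.Int.mod_eq_emod_of_pos (by norm_num)]
    simp only [List.map_cons, List.sum_cons]
    omega

-- one step: B's pointer lands on Lk, and B's O(1) formula equals A's rescan (both then take the running min)
lemma step_eq (cs : List Int) (hs : cs.Pairwise (· ≤ ·)) (s : Int) (k : Nat) (b : Option Int)
    (hk : k ≤ Lk cs s) :
    altStep cs (cs.scanl (· + ·) 0) ((cs.scanl (· + ·) 0).getD cs.length 0) cs.length (k, b) s
      = (Lk cs s, solveStep cs b s) := by
  have hadv : advanceK cs s k = Lk cs s := advanceK_eq cs s (cs.length - k) k (le_refl _) hk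
  have hLle : Lk cs s ≤ cs.length := Lk_le cs s
  have hpre : (cs.scanl (· + ·) 0).getD (Lk cs s) 0 = (cs.take (Lk cs s)).sum := by
    rw [scanl_getD cs 0 (Lk cs s) hLle]; ring
  have htot : (cs.scanl (· + ·) 0).getD cs.length 0 = cs.sum := by
    rw [scanl_getD cs 0 cs.length (le_refl _)]; simp
  have hcur : PySem.Int.mod (s * (Lk cs s : Int) - (cs.take (Lk cs s)).sum
        + (cs.sum - (cs.take (Lk cs s)).sum) - s * ((cs.length - Lk cs s : Nat) : Int)) 10000003
      = PySem.Int.mod (cs.foldl (fun c cross => PySem.Int.mod (c + |cross - s|) 10000003) 0) 10000003 := by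
    rw [foldl_mod s cs 0, zero_add, sum_abs cs s hs]
  simp only [altStep, solveStep, hadv, hpre, htot]
  cases b with
  | none => dsimp only; rw [hcur]
  | some a =>
    dsimp only
    rw [← hcur, Int.min_def]
    simp only [Prod.mk.injEq, Option.some.injEq]
    refine ⟨trivial, ?_⟩
    split_ifs <;> omega

lemma fold_eq (cs : List Int) (hs : cs.Pairwise (· ≤ ·)) :
    ∀ (r : List Int), r.Pairwise (· ≤ ·) → ∀ (k : Nat) (b : Option Int),
      (∀ s ∈ r, k ≤ Lk cs s) →
      (r.foldl (altStep cs (cs.scanl (· + ·) 0) ((cs.scanl (· + ·) 0).getD cs.length 0) cs.length)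
          (k, b)).2
        = r.foldl (solveStep cs) b := by
  intro r
  induction r with
  | nil => intro _ k b _; rfl
  | cons s t ih =>
    intro hr k b hk
    rcases List.pairwise_cons.mp hr with ⟨hsall, ht⟩
    rw [List.foldl_cons, List.foldl_cons, step_eq cs hs s k b (hk s (List.mem_cons_self))]
    exact ih ht (Lk cs s) (solveStep cs b s)
      (fun s' hs' => le_trans (Lk_mono cs s s' (hsall s' hs')) (le_refl _))

-- ===== VERDICT (by name: the statement is the Claim_ definition above) =====
theorem solve_spec : Claim_equal_solve := by
  intro A _
  unfold Spec_solve
  show solve A = solve_alt A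
  have hB := crB_eq A.toList 0 []
  simp only [List.nil_append, List.length_nil, Nat.cast_zero] at hB
  have hA := crA_eq A.toList 0 0
  simp only [solve, solve_alt, hA, hB]
  by_cases h0 : (crAux A.toList 0 0).length = 0
  · simp [h0]
  · rw [if_neg h0, if_neg h0]
    rw [fold_eq (crAux A.toList 0 0) (crAux_sorted A.toList 0 0)
      (PySem.List.pyRange 0 (PySem.Str.len A) 1)
      ((PySem.List.pairwise_lt_pyRange_one 0 (PySem.Str.len A)).imp le_of_lt)
      0 none (fun s _ => Nat.zero_le _)]
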